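-- pv_equiv track=rewrite | github.com/georgerapeanu/BBU-Computer-Science | FP/homeworks/a2-georgerapeanu/src/program.py | check_valid_complex_number
-- ===== SOURCE A (Python) =====
-- def check_valid_complex_number(s):
--   """this function checks if given s is a valid complex number
--
--   given a string, this function checks if it respects the rules for it to be considered a valid complex number
--   ignores whitespace
--
--   s: string
--
--   returns valid(boolean)
--   """
--
--   s = s.strip().replace(' ','')
--
--   if len(s) == 0:
--     return False
--
--   #basic rules for valid complex number
--   #1. only chars allowed are digits(0-9), + and - operators, and i
--   #2. must contain at most one i
--   #3. must contain at most 2 operators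
--   #4. in case the is an i, it should be on the last string position
--   #5. in case of 2 operators first one should be on the first string position
--   #6. each operator must be responsible for a non empty substring
--   #7. in case of 2 parts second one should contain i
--
--   cnt_operators = 0
--   cnt_i = 0;
--
--   operators_positions = []
--
--   #1. only chars allowed are digits(0-9), + and - operators, and i
--   for i in range(0,len(s)):
--     if ord('0') <= ord(s[i]) and ord(s[i]) <= ord('9'):
--       continue
--     if s[i] == '+' or s[i] == '-':
--       cnt_operators += 1
--       operators_positions.append(i)
--       continue;
--     if s[i] == 'i':
--       cnt_i += 1
--       continue
--     return False
--
--   #2. must contain at most one i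
--   #3. must contain at most 2 operators
--   if cnt_operators > 2 or cnt_i > 1:
--     return False
--
--   #4. in case the is an i, it should be on the last string position
--   if cnt_i == 1 and s.find('i') != len(s) - 1:
--     return False
--
--   #5. in case of 2 operators first one should be on the first string position
--   if cnt_operators == 2 and operators_positions[0] != 0:
--     return False
--
--   #6. each operator must be responsible for a non empty substring
--   for x in operators_positions:
--     if x + 1 == len(s) or s[x + 1] == '+' or s[x + 1] == '-':
--       return False
--
--
--   #7. in case of 2 parts second one should contain i
--   if cnt_operators > 0 and operators_positions[-1] != 0 and cnt_i == 0:
--     return False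
--
--   return True;
-- ===== SOURCE B (Python) =====
-- def check_valid_complex_number(s):
--   """Single-pass LL(1) parser for the grammar  [sign] digits  |  [sign] digits 'i'  |  [sign] digits1 sign digits 'i'
--   (digits1 non-empty), which is exactly the language A's rule checks accept."""
--   s = s.strip().replace(' ', '')
--   n = len(s)
--   j = 0
--   if j < n and (s[j] == '+' or s[j] == '-'):
--     j += 1
--   start = j
--   while j < n and '0' <= s[j] <= '9':
--     j += 1
--   d1 = j - start
--   if j == n:
--     return d1 > 0
--   if s[j] == 'i':
--     return j + 1 == n
--   if (s[j] == '+' or s[j] == '-') and d1 > 0: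
--     j += 1
--     while j < n and '0' <= s[j] <= '9':
--       j += 1
--     return j + 1 == n and s[j] == 'i'
--   return False
-- ===== Notes on version B (the rewrite author's own statement) =====
-- stated objective: simpler
-- what changed: Replaced the count-and-collect pass (operator and imaginary-unit counters, operator-position list) plus seven positional rule checks by a single-pass deterministic parser of the accepted grammar: optional sign, digit run, then either end, or the imaginary suffix, or a second sign with digit run and the imaginary suffix.
import Mathlib
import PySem

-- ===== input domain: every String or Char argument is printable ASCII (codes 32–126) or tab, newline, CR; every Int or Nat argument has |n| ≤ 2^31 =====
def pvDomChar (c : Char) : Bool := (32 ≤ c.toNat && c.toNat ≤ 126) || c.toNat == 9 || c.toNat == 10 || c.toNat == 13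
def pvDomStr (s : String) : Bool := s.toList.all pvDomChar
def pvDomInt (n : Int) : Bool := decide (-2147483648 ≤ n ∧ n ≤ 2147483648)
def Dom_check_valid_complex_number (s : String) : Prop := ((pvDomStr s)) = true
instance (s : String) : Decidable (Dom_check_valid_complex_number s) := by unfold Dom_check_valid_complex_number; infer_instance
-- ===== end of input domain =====

-- B replaces A's count-and-collect character pass plus seven positional rule checks by a single
-- deterministic left-to-right parser of the grammar [sign]digits | [sign]digits'i' |
-- [sign]digits1 sign digits 'i', which accepts the same strings (objective: simpler).

-- shared by both ports: the character-class tests ('0' <= c <= '9', c in '+-') and the line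
-- `s = s.strip().replace(' ','')` with which both Pythons start
def pvIsDigit (c : Char) : Bool := decide ('0'.toNat ≤ c.toNat) && decide (c.toNat ≤ '9'.toNat)
def pvIsSign (c : Char) : Bool := c == '+' || c == '-'
def pvClean (s : String) : List Char := PySem.Chars.replace (PySem.Chars.strip s.toList) [' '] []

-- ===== PORT A =====
-- A's character loop: early-return None on an invalid char, else (cnt_operators, cnt_i, operators_positions)
def aScan : List Char → Nat → Option (Nat × Nat × List Nat)
  | [], _ => some (0, 0, [])
  | c :: r, idx =>
    if pvIsDigit c then aScan r (idx + 1)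
    else if pvIsSign c then
      match aScan r (idx + 1) with
      | some (co, ci, ps) => some (co + 1, ci, idx :: ps)
      | none => none
    else if c == 'i' then
      match aScan r (idx + 1) with
      | some (co, ci, ps) => some (co, ci + 1, ps)
      | none => none
    else none

-- A's rules 2-7, in A's order.  ps.headD 0 is operators_positions[0] (read only when co = 2, so
-- ps ≠ []); ps.getLastD 0 is operators_positions[-1] (read only when co > 0); t.getD (x+1) '0'
-- is s[x+1], in range because Python's `x + 1 == len(s)` test short-circuits first.
def aChecks (t : List Char) (co ci : Nat) (ps : List Nat) : Bool :=
  if co > 2 ∨ ci > 1 then false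
  else if ci = 1 ∧ PySem.Chars.find t ['i'] ≠ (t.length : Int) - 1 then false
  else if co = 2 ∧ ps.headD 0 ≠ 0 then false
  else if ps.any (fun x => decide (x + 1 = t.length) || pvIsSign (t.getD (x + 1) '0')) then false
  else if 0 < co ∧ ps.getLastD 0 ≠ 0 ∧ ci = 0 then false
  else true

def check_valid_complex_number (s : String) : Bool :=
  let t := pvClean s
  if t.length = 0 then false
  else
    match aScan t 0 with
    | none => false
    | some (co, ci, ps) => aChecks t co ci ps

-- ===== PORT B =====
-- B's digit run `while j < n and '0' <= s[j] <= '9': j += 1`: digits consumed and the remainder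
def bDropDigits : List Char → Nat × List Char
  | [] => (0, [])
  | c :: r => if pvIsDigit c then ((bDropDigits r).1 + 1, (bDropDigits r).2) else (0, c :: r)

-- what Source B does after the first digit run (d1 = its length)
def bTail (d1 : Nat) : List Char → Bool
  | [] => decide (0 < d1)
  | c :: r =>
    if c == 'i' then r.isEmpty
    else if pvIsSign c && decide (0 < d1) then
      match (bDropDigits r).2 with
      | [] => false
      | c2 :: r2 => c2 == 'i' && r2.isEmpty
    else false

def check_valid_complex_number_alt (s : String) : Bool :=
  let t := pvClean s
  let t1 := match t with
    | c :: r => if pvIsSign c then r else c :: r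
    | [] => []
  bTail (bDropDigits t1).1 (bDropDigits t1).2

-- ===== PRECONDITION & SPEC =====
def Spec_check_valid_complex_number (s : String) (out : Bool) : Prop := out = check_valid_complex_number_alt s
instance (s : String) (out : Bool) : Decidable (Spec_check_valid_complex_number s out) := by unfold Spec_check_valid_complex_number; infer_instance

-- ===== CLAIM (what is proved, stated in full; the proofs are below) =====
def Claim_equal_check_valid_complex_number : Prop := ∀ (s : String), Dom_check_valid_complex_number s → Spec_check_valid_complex_number s (check_valid_complex_number s)

-- ===== LEMMAS AND PROOFS =====

lemma digit_ne_i {c : Char} (h : pvIsDigit c = true) : c ≠ 'i' := by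
  rintro rfl; simp [pvIsDigit] at h

lemma digit_not_sign {c : Char} (h : pvIsDigit c = true) : pvIsSign c = false := by
  by_cases h1 : c = '+'
  · subst h1; simp [pvIsDigit] at h
  · by_cases h2 : c = '-'
    · subst h2; simp [pvIsDigit] at h
    · simp [pvIsSign, h1, h2]

lemma sign_cases {c : Char} (h : pvIsSign c = true) : c = '+' ∨ c = '-' := by
  simpa [pvIsSign] using h

lemma sign_ne_i {c : Char} (h : pvIsSign c = true) : c ≠ 'i' := by
  rcases sign_cases h with rfl | rfl <;> decide

lemma sign_not_digit {c : Char} (h : pvIsSign c = true) : pvIsDigit c = false := by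
  rcases sign_cases h with rfl | rfl <;> decide

lemma singleton_prefix_head {c : Char} {l : List Char} (h : [c] <+: l) : l.head? = some c := by
  rcases h with ⟨t, rfl⟩; rfl

lemma prefix_of_getElem? {s : List Char} {k : Nat} {c : Char} (h : s[k]? = some c) :
    [c] <+: s.drop k := by
  have hk : k < s.length := (List.getElem?_eq_some_iff.mp h).1
  have hc : s[k] = c := by simpa [List.getElem?_eq_getElem hk] using h
  rw [List.drop_eq_getElem_cons hk, hc]
  exact ⟨_, rfl⟩

lemma find_at (p r : List Char) (hp : 'i' ∉ p) :
    PySem.Chars.find (p ++ 'i' :: r) ['i'] = (p.length : Int) := by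
  set s := p ++ 'i' :: r with hs
  have hdrop : s.drop p.length = 'i' :: r := by
    simp [hs, List.drop_append_of_le_length]
  have hinf : ['i'] <:+: s := ⟨p, r, by simp [hs]⟩
  have h0 : 0 ≤ PySem.Chars.find s ['i'] := (PySem.Chars.find_nonneg_iff s ['i']).2 hinf
  obtain ⟨hpre, hmin⟩ := PySem.Chars.find_spec h0
  have heq : (PySem.Chars.find s ['i']).toNat = p.length := by
    rcases lt_trichotomy (PySem.Chars.find s ['i']).toNat p.length with h | h | h
    · exfalso
      have hh := singleton_prefix_head hpre
      rw [List.head?_drop] at hh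
      have : s[(PySem.Chars.find s ['i']).toNat]? = p[(PySem.Chars.find s ['i']).toNat]? := by
        rw [hs, List.getElem?_append_left h]
      rw [this] at hh
      exact hp (List.mem_of_getElem? hh)
    · exact h
    · exact absurd (prefix_of_getElem? (show s[p.length]? = some 'i' by
        rw [← List.head?_drop, hdrop]; rfl)) (hmin p.length h)
  omega

lemma scan_digits (ds : List Char) (h : ∀ c ∈ ds, pvIsDigit c = true) (rest : List Char) (idx : Nat) :
    aScan (ds ++ rest) idx = aScan rest (idx + ds.length) := by
  induction ds generalizing idx with
  | nil => simp
  | cons a l ih =>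
    have ha : pvIsDigit a = true := h a (by simp)
    rw [List.cons_append]
    show (if pvIsDigit a then aScan (l ++ rest) (idx+1) else _) = _
    rw [if_pos ha, ih (fun c hc => h c (by simp [hc])) (idx + 1)]
    congr 1
    simp; omega

lemma scan_all_digits (ds : List Char) (h : ∀ c ∈ ds, pvIsDigit c = true) (idx : Nat) :
    aScan ds idx = some (0, 0, []) := by
  have := scan_digits ds h [] idx
  simpa [aScan] using this

lemma scan_sign {c : Char} (hc : pvIsSign c = true) (r : List Char) (idx : Nat) :
    aScan (c :: r) idx = match aScan r (idx + 1) with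
      | some (co, ci, ps) => some (co + 1, ci, idx :: ps)
      | none => none := by
  show (if pvIsDigit c then _ else if pvIsSign c then _ else _) = _
  rw [if_neg (by simp [sign_not_digit hc]), if_pos hc]

lemma scan_i (r : List Char) (idx : Nat) :
    aScan ('i' :: r) idx = match aScan r (idx + 1) with
      | some (co, ci, ps) => some (co, ci + 1, ps)
      | none => none := by
  rfl

lemma scan_bad {c : Char} (h1 : pvIsDigit c = false) (h2 : pvIsSign c = false) (h3 : c ≠ 'i')
    (r : List Char) (idx : Nat) : aScan (c :: r) idx = none := by
  show (if pvIsDigit c then _ else if pvIsSign c then _ else if c == 'i' then _ else none) = _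
  rw [if_neg (by simp [h1]), if_neg (by simp [h2]), if_neg (by simpa using h3)]

lemma dropDigits_eq (t : List Char) :
    bDropDigits t = ((t.takeWhile pvIsDigit).length, t.dropWhile pvIsDigit) := by
  induction t with
  | nil => rfl
  | cons a l ih =>
    by_cases h : pvIsDigit a <;>
      simp [bDropDigits, h, ih, List.takeWhile_cons, List.dropWhile_cons]

lemma dropWhile_head_false {p : Char → Bool} {u : List Char} {c : Char} {r : List Char}
    (h : u.dropWhile p = c :: r) : p c = false := by
  induction u with
  | nil => simp at h
  | cons a l ih =>
    rw [List.dropWhile_cons] at h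
    by_cases ha : p a <;> simp [ha] at h
    · exact ih h
    · rcases h with ⟨rfl, rfl⟩; simpa using ha

lemma getD_append_len (l1 l2 : List Char) (k : Nat) (d : Char) :
    (l1 ++ l2).getD (l1.length + k) d = l2.getD k d := by
  simp [List.getD, List.getElem?_append_right (by omega : l1.length ≤ l1.length + k)]

lemma getD_all {P : Char → Bool} {b : Bool} {l : List Char} (h : ∀ c ∈ l, P c = b) {k : Nat}
    (hk : k < l.length) (d : Char) : P (l.getD k d) = b := by
  rw [List.getD_eq_getElem?_getD, List.getElem?_eq_getElem hk]
  exact h _ (List.getElem_mem hk)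

lemma aChecks_big {t : List Char} {co ci : Nat} {ps : List Nat} (h : co > 2 ∨ ci > 1) :
    aChecks t co ci ps = false := by
  unfold aChecks; rw [if_pos h]

lemma aChecks_find {t : List Char} {co ci : Nat} {ps : List Nat} (h1 : ci = 1)
    (h2 : PySem.Chars.find t ['i'] ≠ (t.length : Int) - 1) : aChecks t co ci ps = false := by
  unfold aChecks
  split_ifs with a b c d e <;> try rfl
  exact absurd ⟨h1, h2⟩ b

lemma aChecks_rule5 {t : List Char} {co ci : Nat} {ps : List Nat} (h1 : co = 2)
    (h2 : ps.headD 0 ≠ 0) : aChecks t co ci ps = false := by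
  unfold aChecks
  split_ifs with a b c d e <;> try rfl
  exact absurd ⟨h1, h2⟩ c

lemma aChecks_rule6 {t : List Char} {co ci : Nat} {ps : List Nat}
    (h : ps.any (fun x => decide (x + 1 = t.length) || pvIsSign (t.getD (x + 1) '0')) = true) :
    aChecks t co ci ps = false := by
  unfold aChecks
  split_ifs <;> rfl

lemma aChecks_rule7 {t : List Char} {co ci : Nat} {ps : List Nat} (h1 : 0 < co)
    (h2 : ps.getLastD 0 ≠ 0) (h3 : ci = 0) : aChecks t co ci ps = false := by
  unfold aChecks
  split_ifs with a b c d e <;> try rfl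
  exact absurd ⟨h1, h2, h3⟩ e

lemma aChecks_true {t : List Char} {co ci : Nat} {ps : List Nat}
    (h1 : ¬(co > 2 ∨ ci > 1))
    (h2 : ¬(ci = 1 ∧ PySem.Chars.find t ['i'] ≠ (t.length : Int) - 1))
    (h3 : ¬(co = 2 ∧ ps.headD 0 ≠ 0))
    (h4 : ps.any (fun x => decide (x + 1 = t.length) || pvIsSign (t.getD (x + 1) '0')) = false)
    (h5 : ¬(0 < co ∧ ps.getLastD 0 ≠ 0 ∧ ci = 0)) : aChecks t co ci ps = true := by
  unfold aChecks
  rw [if_neg h1, if_neg h2, if_neg h3, if_neg (fun hh => (by decide : (true:Bool) ≠ false) (hh.symm.trans h4)), if_neg h5]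

lemma nonsign_of_digits {l : List Char} (h : ∀ c ∈ l, pvIsDigit c = true) :
    ∀ c ∈ l, pvIsSign c = false := fun c hc => digit_not_sign (h c hc)

lemma nonsign_append_i {l : List Char} (h : ∀ c ∈ l, pvIsDigit c = true) :
    ∀ c ∈ l ++ ['i'], pvIsSign c = false := by
  intro c hc
  rcases List.mem_append.mp hc with hm | hm
  · exact digit_not_sign (h c hm)
  · simp at hm; subst hm; decide

lemma i_notin_digits {l : List Char} (h : ∀ c ∈ l, pvIsDigit c = true) : 'i' ∉ l :=
  fun hm => digit_ne_i (h _ hm) rfl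

lemma i_notin_mid {p d : List Char} {c : Char} (hp : 'i' ∉ p) (hc : pvIsSign c = true)
    (hd : ∀ x ∈ d, pvIsDigit x = true) : 'i' ∉ p ++ c :: d := by
  intro hm
  rcases List.mem_append.mp hm with hm | hm
  · exact hp hm
  · rcases List.mem_cons.mp hm with hm | hm
    · exact sign_ne_i hc hm.symm
    · exact i_notin_digits hd hm

lemma rule6_elt_false {t : List Char} {x : Nat}
    (h1 : ¬ (x + 1 = t.length)) (h2 : pvIsSign (t.getD (x + 1) '0') = false) :
    (decide (x + 1 = t.length) || pvIsSign (t.getD (x + 1) '0')) = false := by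
  rw [decide_eq_false h1, Bool.false_or]
  exact h2

lemma getD_at (l1 l2 : List Char) (n k : Nat) (h : n = l1.length + k) (d : Char) :
    (l1 ++ l2).getD n d = l2.getD k d := by subst h; exact getD_append_len l1 l2 k d

lemma main_lemma (pre u : List Char)
    (hpre : pre = [] ∨ ∃ c, pvIsSign c = true ∧ pre = [c])
    (hu : pre = [] → ∀ c r, u = c :: r → pvIsSign c = false) :
    (if (pre ++ u).length = 0 then false
     else match aScan (pre ++ u) 0 with
       | none => false
       | some (co, ci, ps) => aChecks (pre ++ u) co ci ps)
    = bTail (bDropDigits u).1 (bDropDigits u).2 := by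
  obtain ⟨ds, rest, hds, hdw, hbd, hu_eq⟩ :
      ∃ ds rest, (∀ c ∈ ds, pvIsDigit c = true) ∧
        List.dropWhile pvIsDigit u = rest ∧ bDropDigits u = (ds.length, rest) ∧ u = ds ++ rest :=
    ⟨_, _, fun c hc => List.mem_takeWhile_imp hc, rfl, dropDigits_eq u,
      (List.takeWhile_append_dropWhile).symm⟩
  subst hu_eq
  rw [hbd]
  change _ = bTail ds.length rest
  have hdsi : 'i' ∉ ds := i_notin_digits hds
  rcases rest with _ | ⟨c1, r2⟩
  · -- rest = [] : t is [sign] digits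
    rcases hpre with rfl | ⟨c, hc, rfl⟩
    · by_cases h0 : ds = []
      · subst h0; simp [bTail]
      · have hlen : 0 < ds.length := List.length_pos_iff.mpr h0
        rw [List.nil_append, List.append_nil, if_neg (by simp [h0]),
          scan_all_digits ds hds 0]
        show aChecks ds 0 0 [] = _
        rw [aChecks_true (by omega) (by rintro ⟨h, -⟩; omega) (by rintro ⟨h, -⟩; omega)
          (by simp) (by rintro ⟨h, -⟩; omega)]
        simp [bTail, hlen]
    · rw [List.singleton_append, List.append_nil, if_neg (by simp),
        scan_sign hc, scan_all_digits ds hds 1]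
      by_cases h0 : ds = []
      · -- t = [c] : rule 6 fires (operator at end)
        subst h0
        show aChecks [c] 1 0 [0] = _
        rw [aChecks_rule6 (by simp)]
        simp [bTail]
      · -- t = c :: ds : valid signed integer
        have hlen : 0 < ds.length := List.length_pos_iff.mpr h0
        show aChecks (c :: ds) 1 0 [0] = _
        rw [aChecks_true (by omega) (by rintro ⟨h, -⟩; omega) (by rintro ⟨h, -⟩; omega)
          (by
            rw [List.any_cons, List.any_nil, rule6_elt_false (by simp <;> omega)
              (by rw [List.getD_cons_succ]
                  exact getD_all (nonsign_of_digits hds) hlen '0')]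
            rfl)
          (by rintro ⟨-, h, -⟩; simp at h)]
        simp [bTail, hlen]
  · -- rest = c1 :: r2
    have hc1d : pvIsDigit c1 = false := dropWhile_head_false hdw
    by_cases hci : c1 = 'i'
    · subst hci
      by_cases hr2 : r2 = []
      · -- TRUE leaf : [sign] digits 'i'
        subst hr2
        rcases hpre with rfl | ⟨c, hc, rfl⟩
        · rw [List.nil_append, if_neg (by simp), scan_digits ds hds _ 0, scan_i]
          show aChecks (ds ++ 'i' :: []) 0 1 [] = _
          rw [aChecks_true (by omega)
            (by rintro ⟨-, hx⟩
                exact hx (by rw [find_at ds [] hdsi]; simp))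
            (by rintro ⟨h, -⟩; omega) (by simp) (by rintro ⟨h, -⟩; omega)]
          simp [bTail]
        · rw [List.singleton_append, if_neg (by simp), scan_sign hc,
            scan_digits ds hds _ 1, scan_i]
          show aChecks (c :: (ds ++ 'i' :: [])) 1 1 [0] = _
          rw [aChecks_true (by omega)
            (by rintro ⟨-, hx⟩
                apply hx
                have ht : c :: (ds ++ 'i' :: []) = (c :: ds) ++ 'i' :: [] := by simp
                rw [ht, find_at (c :: ds) []
                  (by intro hm
                      rcases List.mem_cons.mp hm with h | h
                      · exact sign_ne_i hc h.symm
                      · exact hdsi h)]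
                simp)
            (by rintro ⟨h, -⟩; omega)
            (by
              rw [List.any_cons, List.any_nil, rule6_elt_false (by simp)
                (by rw [List.getD_cons_succ]
                    exact getD_all (nonsign_append_i hds) (by simp) '0')]
              rfl)
            (by rintro ⟨-, -, h⟩; simp at h)]
          simp [bTail]
      · -- FALSE leaf : [sign] digits 'i' junk
        have hl2 : 0 < r2.length := List.length_pos_iff.mpr hr2
        have hB : bTail ds.length ('i' :: r2) = false := by simp [bTail, hr2]
        rw [hB]
        rcases hpre with rfl | ⟨c, hc, rfl⟩
        · rw [List.nil_append, if_neg (by simp), scan_digits ds hds _ 0, scan_i]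
          rcases hscan : aScan r2 (0 + ds.length + 1) with _ | ⟨co2, ci2, ps2⟩
          · rfl
          · show aChecks (ds ++ 'i' :: r2) co2 (ci2 + 1) ps2 = false
            by_cases hbig : co2 > 2 ∨ ci2 + 1 > 1
            · exact aChecks_big hbig
            · exact aChecks_find (by omega)
                (by rw [find_at ds r2 hdsi]; simp <;> push_cast <;> omega)
        · rw [List.singleton_append, if_neg (by simp), scan_sign hc,
            scan_digits ds hds _ 1, scan_i]
          rcases hscan : aScan r2 (1 + ds.length + 1) with _ | ⟨co2, ci2, ps2⟩
          · rfl
          · show aChecks (c :: (ds ++ 'i' :: r2)) (co2 + 1) (ci2 + 1) (0 :: ps2) = false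
            by_cases hbig : co2 + 1 > 2 ∨ ci2 + 1 > 1
            · exact aChecks_big hbig
            · refine aChecks_find (by omega) ?_
              have ht : c :: (ds ++ 'i' :: r2) = (c :: ds) ++ 'i' :: r2 := by simp
              rw [ht, find_at (c :: ds) r2
                (by intro hm
                    rcases List.mem_cons.mp hm with h | h
                    · exact sign_ne_i hc h.symm
                    · exact hdsi h)]
              simp <;> push_cast <;> omega
    · -- c1 is not 'i'
      by_cases hcs : pvIsSign c1 = true
      · -- c1 is an operator
        by_cases h0 : ds = []
        · -- no digits before the operator
          subst h0
          have hB : bTail ([] : List Char).length (c1 :: r2) = false := by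
            simp [bTail, hci]
          rw [hB]
          rcases hpre with rfl | ⟨c, hc, rfl⟩
          · exact absurd (hu rfl c1 r2 (by simp)) (by simp [hcs])
          · -- t = c :: c1 :: r2 : rule 6 fires at position 0 (unless an earlier rule does)
            rw [List.singleton_append, List.nil_append, if_neg (by simp),
              scan_sign hc, scan_sign hcs]
            rcases hscan : aScan r2 (0 + 1 + 1) with _ | ⟨co2, ci2, ps2⟩
            · rfl
            · show aChecks (c :: c1 :: r2) (co2 + 1 + 1) ci2 (0 :: (0 + 1) :: ps2) = false
              by_cases hbig : co2 + 1 + 1 > 2 ∨ ci2 > 1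
              · exact aChecks_big hbig
              · exact aChecks_rule6 (by simp [List.any_cons, hcs])
        · -- digits, an operator: decompose r2 into digits ++ rest2
          have hlen : 0 < ds.length := List.length_pos_iff.mpr h0
          obtain ⟨d2, rest2, hd2, hdw2, hbd2, hr2_eq⟩ :
              ∃ d2 rest2, (∀ c ∈ d2, pvIsDigit c = true) ∧
                List.dropWhile pvIsDigit r2 = rest2 ∧ bDropDigits r2 = (d2.length, rest2) ∧
                r2 = d2 ++ rest2 :=
            ⟨_, _, fun c hc => List.mem_takeWhile_imp hc, rfl, dropDigits_eq r2,
              (List.takeWhile_append_dropWhile).symm⟩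
          subst hr2_eq
          have hpI : 'i' ∉ ds ++ c1 :: d2 := i_notin_mid hdsi hcs hd2
          rcases rest2 with _ | ⟨x, r3⟩
          · -- rest2 = [] : [sign] digits sign digits, no 'i' : rule 6 or 7 fires
            have hbd2' : bDropDigits d2 = (d2.length, []) := by simpa using hbd2
            have hB : bTail ds.length (c1 :: (d2 ++ [])) = false := by
              simp [bTail, hci, hcs, hlen, hbd2']
            rw [hB]
            rcases hpre with rfl | ⟨c, hc, rfl⟩
            · rw [List.nil_append, if_neg (by simp), scan_digits ds hds _ 0,
                scan_sign hcs, scan_digits d2 hd2 [] _]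
              show aChecks (ds ++ c1 :: (d2 ++ [])) 1 0 [0 + ds.length] = false
              by_cases hd20 : d2 = []
              · subst hd20
                exact aChecks_rule6 (by simp)
              · exact aChecks_rule7 (by omega) (by simp <;> omega) rfl
            · rw [List.singleton_append, if_neg (by simp), scan_sign hc,
                scan_digits ds hds _ 1, scan_sign hcs, scan_digits d2 hd2 [] _]
              show aChecks (c :: (ds ++ c1 :: (d2 ++ []))) 2 0 [0, 0 + 1 + ds.length] = false
              by_cases hd20 : d2 = []
              · subst hd20
                exact aChecks_rule6 (by simp <;> omega)
              · exact aChecks_rule7 (by omega) (by simp <;> omega) rfl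
          · have hxd : pvIsDigit x = false := dropWhile_head_false hdw2
            by_cases hxi : x = 'i'
            · subst hxi
              by_cases hr3 : r3 = []
              · -- TRUE leaf : [sign] digits sign digits 'i'
                subst hr3
                have hB : bTail ds.length (c1 :: (d2 ++ ['i'])) = true := by
                  simp [bTail, hci, hcs, hlen, hbd2]
                rw [hB]
                have hteq : ∀ a : List Char, a ++ c1 :: (d2 ++ 'i' :: []) =
                    (a ++ c1 :: d2) ++ 'i' :: [] := by intro a; simp
                rcases hpre with rfl | ⟨c, hc, rfl⟩
                · rw [List.nil_append, if_neg (by simp), scan_digits ds hds _ 0,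
                    scan_sign hcs, scan_digits d2 hd2 _, scan_i]
                  show aChecks (ds ++ c1 :: (d2 ++ 'i' :: [])) 1 1 [0 + ds.length] = true
                  refine aChecks_true (by omega) ?_ (by rintro ⟨h, -⟩; omega) ?_
                    (by rintro ⟨-, -, h⟩; simp at h)
                  · rintro ⟨-, hx⟩
                    apply hx
                    rw [hteq, find_at (ds ++ c1 :: d2) [] hpI]
                    simp <;> push_cast <;> omega
                  · rw [List.any_cons, List.any_nil, rule6_elt_false (by simp <;> omega)
                      (by rw [getD_at ds (c1 :: (d2 ++ 'i' :: [])) _ 1 (by omega),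
                            List.getD_cons_succ]
                          exact getD_all (nonsign_append_i hd2) (by simp) '0')]
                    rfl
                · rw [List.singleton_append, if_neg (by simp), scan_sign hc,
                    scan_digits ds hds _ 1, scan_sign hcs, scan_digits d2 hd2 _, scan_i]
                  show aChecks (c :: (ds ++ c1 :: (d2 ++ 'i' :: []))) 2 1
                    [0, 0 + 1 + ds.length] = true
                  refine aChecks_true (by omega) ?_ (by rintro ⟨-, h⟩; simp at h) ?_
                    (by rintro ⟨-, -, h⟩; simp at h)
                  · rintro ⟨-, hx⟩
                    apply hx
                    have : c :: (ds ++ c1 :: (d2 ++ 'i' :: [])) =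
                        ((c :: ds) ++ c1 :: d2) ++ 'i' :: [] := by simp
                    rw [this, find_at ((c :: ds) ++ c1 :: d2) []
                      (by intro hm
                          rcases List.mem_append.mp hm with hm | hm
                          · rcases List.mem_cons.mp hm with hm | hm
                            · exact sign_ne_i hc hm.symm
                            · exact hdsi hm
                          · rcases List.mem_cons.mp hm with hm | hm
                            · exact sign_ne_i hcs hm.symm
                            · exact i_notin_digits hd2 hm)]
                    simp <;> push_cast <;> omega
                  · rw [List.any_cons, List.any_cons, List.any_nil,
                      rule6_elt_false (by simp <;> omega)
                        (by rw [List.getD_cons_succ, List.getD_append _ _ _ _ (by omega)]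
                            exact digit_not_sign (getD_all hds hlen '0')),
                      rule6_elt_false (by simp <;> omega)
                        (by rw [List.getD_cons_succ,
                              getD_at ds (c1 :: (d2 ++ 'i' :: [])) _ 1 (by omega),
                              List.getD_cons_succ]
                            exact getD_all (nonsign_append_i hd2) (by simp) '0')]
                    rfl
              · -- FALSE leaf : second 'i' part followed by junk
                have hl3 : 0 < r3.length := List.length_pos_iff.mpr hr3
                have hB : bTail ds.length (c1 :: (d2 ++ 'i' :: r3)) = false := by
                  simp [bTail, hci, hcs, hlen, hbd2, hr3]
                rw [hB]
                rcases hpre with rfl | ⟨c, hc, rfl⟩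
                · rw [List.nil_append, if_neg (by simp), scan_digits ds hds _ 0,
                    scan_sign hcs, scan_digits d2 hd2 _, scan_i]
                  rcases hscan : aScan r3 (0 + ds.length + 1 + d2.length + 1)
                    with _ | ⟨co3, ci3, ps3⟩
                  · rfl
                  · show aChecks (ds ++ c1 :: (d2 ++ 'i' :: r3)) (co3 + 1) (ci3 + 1)
                      ((0 + ds.length) :: ps3) = false
                    by_cases hbig : co3 + 1 > 2 ∨ ci3 + 1 > 1
                    · exact aChecks_big hbig
                    · refine aChecks_find (by omega) ?_
                      have : ds ++ c1 :: (d2 ++ 'i' :: r3) =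
                          (ds ++ c1 :: d2) ++ 'i' :: r3 := by simp
                      rw [this, find_at (ds ++ c1 :: d2) r3 hpI]
                      simp <;> push_cast <;> omega
                · rw [List.singleton_append, if_neg (by simp), scan_sign hc,
                    scan_digits ds hds _ 1, scan_sign hcs, scan_digits d2 hd2 _, scan_i]
                  rcases hscan : aScan r3 (0 + 1 + ds.length + 1 + d2.length + 1)
                    with _ | ⟨co3, ci3, ps3⟩
                  · rfl
                  · show aChecks (c :: (ds ++ c1 :: (d2 ++ 'i' :: r3))) (co3 + 2) (ci3 + 1)
                      (0 :: (0 + 1 + ds.length) :: ps3) = false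
                    by_cases hbig : co3 + 2 > 2 ∨ ci3 + 1 > 1
                    · exact aChecks_big hbig
                    · refine aChecks_find (by omega) ?_
                      have : c :: (ds ++ c1 :: (d2 ++ 'i' :: r3)) =
                          ((c :: ds) ++ c1 :: d2) ++ 'i' :: r3 := by simp
                      rw [this, find_at ((c :: ds) ++ c1 :: d2) r3
                        (by intro hm
                            rcases List.mem_append.mp hm with hm | hm
                            · rcases List.mem_cons.mp hm with hm | hm
                              · exact sign_ne_i hc hm.symm
                              · exact hdsi hm
                            · rcases List.mem_cons.mp hm with hm | hm
                              · exact sign_ne_i hcs hm.symm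
                              · exact i_notin_digits hd2 hm)]
                      simp <;> push_cast <;> omega
            · by_cases hxs : pvIsSign x = true
              · -- FALSE leaf : a third operator (or second with digits before the first)
                have hB : bTail ds.length (c1 :: (d2 ++ x :: r3)) = false := by
                  simp [bTail, hci, hcs, hlen, hbd2, hxi]
                rw [hB]
                rcases hpre with rfl | ⟨c, hc, rfl⟩
                · rw [List.nil_append, if_neg (by simp), scan_digits ds hds _ 0,
                    scan_sign hcs, scan_digits d2 hd2 _, scan_sign hxs]
                  rcases hscan : aScan r3 (0 + ds.length + 1 + d2.length + 1)
                    with _ | ⟨co3, ci3, ps3⟩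
                  · rfl
                  · show aChecks (ds ++ c1 :: (d2 ++ x :: r3)) (co3 + 1 + 1) ci3
                      ((0 + ds.length) :: (0 + ds.length + 1 + d2.length) :: ps3) = false
                    by_cases hbig : co3 + 1 + 1 > 2 ∨ ci3 > 1
                    · exact aChecks_big hbig
                    · exact aChecks_rule5 (by omega) (by simp <;> omega)
                · rw [List.singleton_append, if_neg (by simp), scan_sign hc,
                    scan_digits ds hds _ 1, scan_sign hcs, scan_digits d2 hd2 _, scan_sign hxs]
                  rcases hscan : aScan r3 (0 + 1 + ds.length + 1 + d2.length + 1)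
                    with _ | ⟨co3, ci3, ps3⟩
                  · rfl
                  · show aChecks (c :: (ds ++ c1 :: (d2 ++ x :: r3))) (co3 + 1 + 1 + 1) ci3
                      (0 :: (0 + 1 + ds.length) :: (0 + 1 + ds.length + 1 + d2.length) :: ps3)
                      = false
                    exact aChecks_big (by omega)
              · -- FALSE leaf : invalid character
                have hB : bTail ds.length (c1 :: (d2 ++ x :: r3)) = false := by
                  simp [bTail, hci, hcs, hlen, hbd2, hxi]
                rw [hB]
                have hbad : ∀ idx, aScan (x :: r3) idx = none := fun idx =>
                  scan_bad hxd (by simp [hxs]) hxi r3 idx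
                rcases hpre with rfl | ⟨c, hc, rfl⟩
                · rw [List.nil_append, if_neg (by simp), scan_digits ds hds _ 0,
                    scan_sign hcs, scan_digits d2 hd2 _, hbad]
                · rw [List.singleton_append, if_neg (by simp), scan_sign hc,
                    scan_digits ds hds _ 1, scan_sign hcs, scan_digits d2 hd2 _, hbad]
      · -- c1 invalid character : scan fails
        have hB : bTail ds.length (c1 :: r2) = false := by simp [bTail, hci, hcs]
        rw [hB]
        have hbad : ∀ idx, aScan (c1 :: r2) idx = none := fun idx =>
          scan_bad hc1d (by simp [hcs]) hci r2 idx
        rcases hpre with rfl | ⟨c, hc, rfl⟩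
        · rw [List.nil_append, if_neg (by simp), scan_digits ds hds _ 0, hbad]
        · rw [List.singleton_append, if_neg (by simp), scan_sign hc,
            scan_digits ds hds _ 1, hbad]

-- ===== VERDICT (by name: the statement is the Claim_ definition above) =====
theorem check_valid_complex_number_spec : Claim_equal_check_valid_complex_number := by
  intro s _
  unfold Spec_check_valid_complex_number check_valid_complex_number check_valid_complex_number_alt
  match h : pvClean s with
  | [] => rfl
  | c :: u =>
    by_cases hs : pvIsSign c = true
    · simpa [hs] using main_lemma [c] u (Or.inr ⟨c, hs, rfl⟩) (by intro h; cases h)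
    · simpa [hs] using main_lemma [] (c :: u)
        (Or.inl rfl)
        (by intro _ c' r' h'; cases h'; simpa using hs)
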